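-- pv_equiv track=rewrite | github.com/sumit4613/advent_of_code_2020 | day06/part2.py | compute
-- ===== SOURCE A (Python) =====
-- def compute(s: str) -> int:
--     count = 0
--     for group in s.split("\n\n"):
--         lines = group.splitlines()
--         all_counted = set(lines[0])
--
--         for other in lines[1:]:
--             all_counted &= set(other)
--         count += len(all_counted)
--     return count
-- ===== SOURCE B (Python) =====
-- def compute(s: str) -> int:
--     total = 0
--     for group in s.split("\n\n"):
--         lines = group.splitlines()
--         n = len(lines)
--         freq = {}
--         for line in lines:
--             for ch in set(line):
--                 freq[ch] = freq.get(ch, 0) + 1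
--         total += sum(1 for v in freq.values() if v == n)
--     return total
-- ===== Notes on version B (the rewrite author's own statement) =====
-- stated objective: idiomatic
-- what changed: Replaces A's progressive set-intersection reduction per group with a tally: count per group, for each letter, how many lines contain it (deduping each line), then count letters whose tally equals the number of lines.
-- outside the precondition, e.g. on compute('\n\n'): A raises IndexError, B returns 0
import Mathlib
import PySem

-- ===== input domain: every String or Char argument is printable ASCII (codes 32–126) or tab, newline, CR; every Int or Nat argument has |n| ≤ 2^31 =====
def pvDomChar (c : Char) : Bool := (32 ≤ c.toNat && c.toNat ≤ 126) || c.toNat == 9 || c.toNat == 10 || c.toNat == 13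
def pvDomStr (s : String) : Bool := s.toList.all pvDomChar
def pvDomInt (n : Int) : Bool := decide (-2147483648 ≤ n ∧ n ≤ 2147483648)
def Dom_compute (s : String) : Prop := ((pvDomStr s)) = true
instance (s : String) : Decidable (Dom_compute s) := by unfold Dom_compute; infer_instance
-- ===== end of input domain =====

-- B replaces A's per-group set-intersection reduction with a per-group letter tally
-- (letters answered by everyone are those whose line-count equals the number of lines); same cost, no speed claim.

-- ===== PORT A =====
-- one group of A's loop body: lines[0] raises IndexError when the group has no lines (excluded by Pre_compute)
def computeGroup (g : String) : Int :=
  match PySem.Str.splitlines g with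
  | [] => 0  -- Python raises IndexError here (lines[0]); such inputs are outside Pre_compute
  | l0 :: rest =>
      PySem.Set.len
        (rest.foldl (fun acc other => PySem.Set.inter acc (PySem.Set.ofList other.toList))
          (PySem.Set.ofList l0.toList))

def compute (s : String) : Int :=
  ((PySem.Str.split? s "\n\n").getD []).foldl (fun count g => count + computeGroup g) 0

-- ===== PORT B =====
def computeGroupAlt (g : String) : Int :=
  let lines := PySem.Str.splitlines g
  let n : Int := lines.length
  let freq : PySem.Dict Char Int :=
    lines.foldl
      (fun d line => (PySem.Set.ofList line.toList).foldl (fun d c => d.modify c 0 (· + 1)) d)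
      PySem.Dict.empty
  freq.values.foldl (fun acc v => if v == n then acc + 1 else acc) 0

def compute_alt (s : String) : Int :=
  ((PySem.Str.split? s "\n\n").getD []).foldl (fun total g => total + computeGroupAlt g) 0

-- ===== PRECONDITION & SPEC =====
-- Pre_ excludes exactly the inputs where some "\n\n"-separated group is empty: there A's lines[0] raises IndexError (B's tally would return the total with 0 for such a group).
def Pre_compute (s : String) : Prop :=
  ∀ g ∈ (PySem.Str.split? s "\n\n").getD [], PySem.Str.splitlines g ≠ []

instance (s : String) : Decidable (Pre_compute s) := by unfold Pre_compute; infer_instance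

def pvWitness_compute : String := "ab\ncb"

def Spec_compute (s : String) (out : Int) : Prop := out = compute_alt s
instance (s : String) (out : Int) : Decidable (Spec_compute s out) := by unfold Spec_compute; infer_instance

-- ===== CLAIM (what is proved, stated in full; the proofs are below) =====
def Claim_equal_compute : Prop := ∀ (s : String), Dom_compute s → Pre_compute s → Spec_compute s (compute s)

-- ===== LEMMAS AND PROOFS =====

theorem foldA_char (rest : List String) (s : PySem.Set Char) (hs : s.Nodup) :
    (rest.foldl (fun acc other => PySem.Set.inter acc (PySem.Set.ofList other.toList)) s).Nodup ∧
    ∀ c, c ∈ rest.foldl (fun acc other => PySem.Set.inter acc (PySem.Set.ofList other.toList)) s ↔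
      c ∈ s ∧ ∀ l ∈ rest, c ∈ l.toList := by
  induction rest generalizing s with
  | nil => simpa using hs
  | cons l t ih =>
      simp only [List.foldl_cons]
      have h1 : (PySem.Set.inter s (PySem.Set.ofList l.toList)).Nodup := by
        simp [PySem.Set.inter]; exact hs.filter _
      obtain ⟨hn, hm⟩ := ih _ h1
      refine ⟨hn, fun c => ?_⟩
      rw [hm c]
      simp [PySem.Set.inter, List.mem_filter, PySem.Set.mem_ofList]
      tauto


theorem count_flatMap_ofList (lines : List String) (c : Char) :
    (lines.flatMap (fun l => PySem.Set.ofList l.toList)).count c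
      = lines.countP (fun l => decide (c ∈ l.toList)) := by
  induction lines with
  | nil => simp
  | cons l t ih =>
      simp only [List.flatMap_cons, List.count_append, List.countP_cons, ih]
      have : (PySem.Set.ofList l.toList).count c = if c ∈ l.toList then 1 else 0 := by
        rcases Decidable.em (c ∈ l.toList) with h | h
        · rw [if_pos h]
          exact List.count_eq_one_of_mem (PySem.Set.nodup_ofList _) ((PySem.Set.mem_ofList _ _).2 h)
        · rw [if_neg h]
          simp [List.count_eq_zero, PySem.Set.mem_ofList, h]
      rw [this]
      by_cases h : c ∈ l.toList <;> simp [h, Nat.add_comm]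

theorem group_eq (g : String) (h : PySem.Str.splitlines g ≠ []) :
    computeGroup g = computeGroupAlt g := by
  unfold computeGroup computeGroupAlt
  cases hl : PySem.Str.splitlines g with
  | nil => exact absurd hl h
  | cons l0 rest =>
  simp only []
  set lines := l0 :: rest with hlines
  set xs : List Char := lines.flatMap (fun l => PySem.Set.ofList l.toList) with hxs
  -- B side: the nested tally fold is Counter(xs)
  have hfreq :
      lines.foldl
        (fun d line => (PySem.Set.ofList line.toList).foldl (fun d c => d.modify c 0 (· + 1)) d)
        PySem.Dict.empty = PySem.Dict.counter xs := by
    rw [PySem.Dict.counter_eq_foldl, hxs, List.foldl_flatMap]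
  rw [hfreq]
  have hvals : (PySem.Dict.counter xs).values
      = (PySem.Set.ofList xs).map (fun k => ((xs.count k : Nat) : Int)) := by
    simp [PySem.Dict.values, PySem.Dict.items_counter, List.map_map, Function.comp]
  rw [hvals, PySem.List.foldl_beq_add_one, zero_add]
  -- now RHS is the count of n among mapped values
  rw [List.count_eq_countP, List.countP_map]
  -- A side via the fold characterization
  obtain ⟨hnodF, hmemF⟩ := foldA_char rest (PySem.Set.ofList l0.toList) (PySem.Set.nodup_ofList _)
  set F := rest.foldl (fun acc other => PySem.Set.inter acc (PySem.Set.ofList other.toList))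
      (PySem.Set.ofList l0.toList) with hF
  show PySem.Set.len F = _
  have hQ : ∀ k : Char,
      ((fun x => x == (lines.length : Int)) ∘ fun k => ((xs.count k : Nat) : Int)) k
        = decide (∀ l ∈ lines, k ∈ l.toList) := by
    intro k
    simp only [Function.comp]
    have h1 : xs.count k = lines.countP (fun l => decide (k ∈ l.toList)) :=
      count_flatMap_ofList lines k
    by_cases hall : ∀ l ∈ lines, k ∈ l.toList
    · have : xs.count k = lines.length := by
        rw [h1, List.countP_eq_length]; intro a ha; exact decide_eq_true (hall a ha)
      simp [this]
      exact hall
    · have hne : xs.count k ≠ lines.length := by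
        rw [h1]; intro hc
        exact hall (fun a ha => of_decide_eq_true (List.countP_eq_length.1 hc a ha))
      have : ((xs.count k : Nat) : Int) ≠ (lines.length : Int) := by exact_mod_cast hne
      simp [this, hall]
  rw [List.countP_congr (fun k _ => by rw [hQ k]), List.countP_eq_length_filter]
  -- both sides are lengths of nodup lists with the same membership
  have hperm : F.Perm ((PySem.Set.ofList xs).filter (fun k => decide (∀ l ∈ lines, k ∈ l.toList))) := by
    rw [List.perm_ext_iff_of_nodup hnodF ((PySem.Set.nodup_ofList _).filter _)]
    intro c
    rw [hmemF c, List.mem_filter]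
    constructor
    · rintro ⟨h0, hrest⟩
      have hall : ∀ l ∈ lines, c ∈ l.toList := by
        intro l hl'
        rcases List.mem_cons.1 hl' with hl' | hl'
        · subst hl'; exact (PySem.Set.mem_ofList _ _).1 h0
        · exact hrest l hl'
      refine ⟨?_, decide_eq_true hall⟩
      rw [PySem.Set.mem_ofList, hxs, List.mem_flatMap]
      exact ⟨l0, List.mem_cons_self .., (PySem.Set.mem_ofList _ _).2 (hall l0 (List.mem_cons_self ..))⟩
    · rintro ⟨_, hall⟩
      have hall := of_decide_eq_true hall
      exact ⟨(PySem.Set.mem_ofList _ _).2 (hall l0 (List.mem_cons_self ..)),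
        fun l hl' => hall l (List.mem_cons_of_mem _ hl')⟩
  rw [PySem.Set.len, hperm.length_eq]

-- ===== VERDICT (by name: the statement is the Claim_ definition above) =====
theorem compute_spec : Claim_equal_compute := by
  intro s _ hpre
  show compute s = compute_alt s
  unfold compute compute_alt
  rw [PySem.List.foldl_add, PySem.List.foldl_add]
  congr 1
  congr 1
  exact List.map_congr_left (fun g hg => group_eq g (hpre g hg))
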